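-- pv_equiv track=rewrite | github.com/ulab-uiuc/AgentProtocols | script/fail_storm_recovery/gaia_to_shard_converter.py | split_document_into_shards
-- ===== SOURCE A (Python) =====
-- import math
-- from typing import List, Dict
--
-- def split_document_into_shards(document_content: str, num_shards: int = 8) -> List[str]:
--     """Split document into roughly equal shards for distribution."""
--     lines = document_content.strip().split('\n')
--     lines_per_shard = math.ceil(len(lines) / num_shards)
--
--     shards = []
--     for i in range(num_shards):
--         start_idx = i * lines_per_shard
--         end_idx = min((i + 1) * lines_per_shard, len(lines))
--         shard_content = '\n'.join(lines[start_idx:end_idx])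
--         shards.append(shard_content)
--
--     return shards
-- ===== SOURCE B (Python) =====
-- def split_document_into_shards(document_content: str, num_shards: int = 8):
--     """Split document into roughly equal shards for distribution."""
--     lines = document_content.strip().split('\n')
--     if num_shards <= 0:
--         return []
--     lines_per_shard = -(-len(lines) // num_shards)  # exact ceiling division
--     buckets = [[] for _ in range(num_shards)]
--     for idx, line in enumerate(lines):
--         buckets[idx // lines_per_shard].append(line)
--     return ['\n'.join(b) for b in buckets]
-- ===== Notes on version B (the rewrite author's own statement) =====
-- stated objective: alternative
-- what changed: Replaces the per-shard start/end slice-index computation with a single enumerate pass that scatters each line into its bucket by idx // lines_per_shard (integer ceiling division instead of math.ceil of a float), then joins each bucket.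
-- outside the precondition, e.g. on split_document_into_shards('a\nb', 0): A raises ZeroDivisionError, B returns []
import Mathlib
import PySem

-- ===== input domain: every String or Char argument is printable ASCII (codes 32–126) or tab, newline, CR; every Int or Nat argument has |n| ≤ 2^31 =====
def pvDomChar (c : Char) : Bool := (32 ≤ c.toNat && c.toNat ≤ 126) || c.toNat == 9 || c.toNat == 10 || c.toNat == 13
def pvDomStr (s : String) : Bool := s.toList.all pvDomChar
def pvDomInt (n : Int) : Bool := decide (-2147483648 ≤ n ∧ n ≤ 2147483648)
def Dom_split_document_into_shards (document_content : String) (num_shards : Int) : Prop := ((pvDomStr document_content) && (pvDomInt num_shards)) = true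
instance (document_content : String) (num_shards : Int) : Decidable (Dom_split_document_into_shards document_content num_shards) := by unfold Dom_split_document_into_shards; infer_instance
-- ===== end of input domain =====

-- B replaces A's per-shard slice-index arithmetic by a single scatter pass over enumerated lines
-- (integer ceiling division instead of math.ceil on a float); equivalence proved on num_shards ≠ 0.

-- ===== PORT A =====
-- math.ceil(len(lines)/num_shards) is ported as exact ceiling division -((-len) // n); for
-- 1 ≤ len(lines) ≤ 2^31 and |num_shards| ≤ 2^31 the float division in A rounds to a value whose
-- ceil equals the exact ceil (the quotient is ≥ 2^-31 away from any other integer), so this is exact on Dom.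
def split_document_into_shards (document_content : String) (num_shards : Int) : List String :=
  let lines : List String := (PySem.Str.split? (PySem.Str.strip document_content) "\n").getD []
    -- sep "\n" ≠ "", so split? is always `some`; .getD [] only discharges the Option
  let lines_per_shard : Int := -(PySem.Int.floordiv (-(lines.length : Int)) num_shards)
  (PySem.List.pyRange 0 num_shards 1).foldl (fun shards i =>
    let start_idx := i * lines_per_shard
    let end_idx := min ((i + 1) * lines_per_shard) (lines.length : Int)
    shards ++ [PySem.Str.join "\n" (PySem.List.slice lines (some start_idx) (some end_idx))]) []

-- ===== PORT B =====
def split_document_into_shards_alt (document_content : String) (num_shards : Int) : List String :=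
  let lines : List String := (PySem.Str.split? (PySem.Str.strip document_content) "\n").getD []
  if num_shards ≤ 0 then []
  else
    let lines_per_shard : Int := -(PySem.Int.floordiv (-(lines.length : Int)) num_shards)
    let buckets : List (List String) := List.replicate num_shards.toNat []
    -- for idx, line in enumerate(lines): buckets[idx // lines_per_shard].append(line)
    -- (idx and lines_per_shard are nonnegative here, and the index is always in range, so
    --  .toNat after the Python floordiv and List.modify are exact)
    ((lines.zipIdx).foldl (fun bs p =>
        bs.modify (PySem.Int.floordiv (p.2 : Int) lines_per_shard).toNat (· ++ [p.1])) buckets).map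
      (fun b => PySem.Str.join "\n" b)

-- ===== PRECONDITION & SPEC =====
-- Pre_ excludes only num_shards = 0, where A raises ZeroDivisionError (len(lines)/0).
def Pre_split_document_into_shards (document_content : String) (num_shards : Int) : Prop :=
  num_shards ≠ 0
instance (document_content : String) (num_shards : Int) : Decidable (Pre_split_document_into_shards document_content num_shards) := by unfold Pre_split_document_into_shards; infer_instance
def pvWitness_split_document_into_shards : String × Int := ("alpha\nbeta\ngamma", 2)

def Spec_split_document_into_shards (document_content : String) (num_shards : Int) (out : List String) : Prop := out = split_document_into_shards_alt document_content num_shards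
instance (document_content : String) (num_shards : Int) (out : List String) : Decidable (Spec_split_document_into_shards document_content num_shards out) := by unfold Spec_split_document_into_shards; infer_instance

-- ===== CLAIM (what is proved, stated in full; the proofs are below) =====
def Claim_equal_split_document_into_shards : Prop := ∀ (document_content : String) (num_shards : Int), Dom_split_document_into_shards document_content num_shards → Pre_split_document_into_shards document_content num_shards → Spec_split_document_into_shards document_content num_shards (split_document_into_shards document_content num_shards)

-- ===== LEMMAS AND PROOFS =====

-- B's scatter loop, element by element: bucket j of the final state is bucket j of the start state
-- followed by exactly the lines whose index divides (by l) to j, in order.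
theorem scatter_getElem? {α : Type} (l : Nat) :
    ∀ (ys : List α) (k : Nat) (bs : List (List α)) (j : Nat),
      ((ys.zipIdx k).foldl (fun bs p => bs.modify (p.2 / l) (· ++ [p.1])) bs)[j]? =
        (bs[j]?).map (· ++ (ys.zipIdx k).filterMap
          (fun p => if p.2 / l = j then some p.1 else none)) := by
  intro ys
  induction ys with
  | nil => intro k bs j; simp
  | cons x xs ih =>
    intro k bs j
    rw [List.zipIdx_cons, List.foldl_cons, ih, List.getElem?_modify, List.filterMap_cons]
    by_cases h : k / l = j
    · simp [h, Function.comp_def, List.append_assoc]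
    · simp [h]

-- selecting a contiguous index interval out of an enumerated list is take/drop
theorem filterMap_zipIdx_interval {α : Type} :
    ∀ (ys : List α) (k a b : Nat),
      (ys.zipIdx k).filterMap (fun p => if a ≤ p.2 ∧ p.2 < b then some p.1 else none) =
        (ys.take (b - k)).drop (a - k) := by
  intro ys
  induction ys with
  | nil => intro k a b; simp
  | cons x xs ih =>
    intro k a b
    rw [List.zipIdx_cons, List.filterMap_cons]
    by_cases hk : a ≤ k ∧ k < b
    · have hb : b - k = (b - (k + 1)) + 1 := by omega
      have ha : a - k = 0 := by omega
      have ha' : a - (k + 1) = 0 := by omega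
      simp only [hk, and_self, if_pos, ih, hb, ha, ha', List.take_succ_cons, List.drop_zero]
    · rw [if_neg hk, ih]
      rcases Nat.lt_or_ge k b with hkb | hkb
      · -- k < b, hence k < a
        have hb : b - k = (b - (k + 1)) + 1 := by omega
        have ha : a - k = (a - (k + 1)) + 1 := by omega
        rw [hb, ha, List.take_succ_cons, List.drop_succ_cons]
      · have hb : b - k = 0 := by omega
        have hb' : b - (k + 1) = 0 := by omega
        simp [hb, hb']

theorem div_eq_iff_interval {l : Nat} (hl : 0 < l) (i j : Nat) :
    i / l = j ↔ j * l ≤ i ∧ i < (j + 1) * l := by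
  constructor
  · rintro rfl
    refine ⟨Nat.div_mul_le_self i l, ?_⟩
    have h1 := Nat.div_add_mod i l
    have h2 := Nat.mod_lt i hl
    have h3 : (i / l + 1) * l = l * (i / l) + l := by ring
    omega
  · rintro ⟨h1, h2⟩
    exact Nat.div_eq_of_lt_le h1 h2

-- A's loop, rewritten as a map over the shard indices with the slice normalised to take/drop.
theorem portA_eq_map (xs : List String) (n : Int) (hn : 0 < n) {lps : Int} (hlps : 0 ≤ lps) :
    (PySem.List.pyRange 0 n 1).foldl (fun shards i =>
        shards ++ [PySem.Str.join "\n" (PySem.List.slice xs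
          (some (i * lps)) (some (min ((i + 1) * lps) (xs.length : Int))))]) [] =
      (List.range n.toNat).map (fun k =>
        PySem.Str.join "\n" (List.take lps.toNat (List.drop (k * lps.toNat) xs))) := by
  rw [PySem.List.pyRange_one, List.foldl_map, PySem.List.foldl_append_singleton_eq_map,
    List.nil_append]
  have hnn : (n - 0).toNat = n.toNat := by omega
  rw [hnn]
  apply List.map_congr_left
  intro k _
  have hc : ((0 : Int) + (k : Int)) = ((k : Nat) : Int) := by push_cast; ring
  rw [hc]
  have h1 : ((k : Nat) : Int) * lps = ((k * lps.toNat : Nat) : Int) := by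
    rw [Nat.cast_mul, Int.toNat_of_nonneg hlps]
  have h2 : (((k : Nat) : Int) + 1) * lps = (((k + 1) * lps.toNat : Nat) : Int) := by
    rw [Nat.cast_mul, Nat.cast_add, Nat.cast_one, Int.toNat_of_nonneg hlps]
  rw [h1, h2, ← Nat.cast_min, PySem.List.slice_natCast]
  congr 1
  rw [List.take_eq_take_iff, List.length_drop]
  have : (k + 1) * lps.toNat = k * lps.toNat + lps.toNat := by ring
  omega

theorem split_eq (document_content : String) (num_shards : Int)
    (hpre : num_shards ≠ 0) :
    split_document_into_shards document_content num_shards =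
      split_document_into_shards_alt document_content num_shards := by
  unfold split_document_into_shards split_document_into_shards_alt
  set xs : List String := (PySem.Str.split? (PySem.Str.strip document_content) "\n").getD []
    with hxs
  clear_value xs
  rcases Int.lt_or_lt_of_ne hpre with hn | hn
  · -- num_shards < 0 : A's range is empty, B's guard fires
    rw [if_pos (by omega : num_shards ≤ 0), PySem.List.pyRange_one_eq_nil (by omega), List.foldl_nil]
  · rw [if_neg (by omega : ¬ num_shards ≤ 0)]
    simp only []
    set L : Int := (xs.length : Int) with hL
    set lps : Int := -(PySem.Int.floordiv (-L) num_shards) with hlpsdef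
    -- lps = ceil(L / num_shards) ≥ 0, and ≥ 1 when xs ≠ []
    have hchar : (lps - 1) * num_shards < L ∧ L ≤ lps * num_shards :=
      (PySem.Int.neg_floordiv_neg_eq_iff_of_pos hn).mp hlpsdef.symm
    have hlps : 0 ≤ lps := by
      by_contra h
      have h1 : lps ≤ -1 := by omega
      have : lps * num_shards ≤ (-1) * num_shards :=
        mul_le_mul_of_nonneg_right h1 (by omega)
      have : L ≤ -num_shards := by omega
      have h0 : (0 : Int) ≤ L := by simp [hL]
      omega
    rw [portA_eq_map xs num_shards hn hlps]
    -- rewrite B's bucket index into Nat division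
    have hcast : lps = ((lps.toNat : Nat) : Int) := (Int.toNat_of_nonneg hlps).symm
    set l : Nat := lps.toNat with hldef
    have hfold :
        (fun (bs : List (List String)) (p : String × Nat) =>
            bs.modify (PySem.Int.floordiv (p.2 : Int) lps).toNat (· ++ [p.1])) =
          (fun bs p => bs.modify (p.2 / l) (· ++ [p.1])) := by
      funext bs p
      rw [hcast, PySem.Int.floordiv_natCast, Int.toNat_natCast]
    rw [hfold]
    apply List.ext_getElem?
    intro j
    rw [List.getElem?_map, List.getElem?_map, scatter_getElem?, List.getElem?_replicate]
    by_cases hj : j < num_shards.toNat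
    · rw [if_pos hj, List.getElem?_range hj]
      simp only [Option.map_some]
      congr 1
      rw [List.nil_append]
      rcases List.eq_nil_or_concat' xs with rfl | ⟨ys, y, rfl⟩
      · simp
      · -- xs ≠ [], hence L ≥ 1 and l ≥ 1
        have hL1 : 1 ≤ L := by simp [hL]
        have hl1 : 0 < l := by
          rw [hldef]
          rcases hchar with ⟨_, h2⟩
          by_contra h
          have : lps ≤ 0 := by omega
          have : lps * num_shards ≤ 0 * num_shards :=
            mul_le_mul_of_nonneg_right this (by omega)
          omega
        have hfn : (fun p : String × Nat => if p.2 / l = j then some p.1 else none) =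
            (fun p => if j * l ≤ p.2 ∧ p.2 < (j + 1) * l then some p.1 else none) := by
          funext p
          by_cases h : p.2 / l = j
          · rw [if_pos h, if_pos ((div_eq_iff_interval hl1 p.2 j).mp h)]
          · rw [if_neg h, if_neg (fun hc => h ((div_eq_iff_interval hl1 p.2 j).mpr hc))]
        rw [hfn, filterMap_zipIdx_interval, Nat.sub_zero, Nat.sub_zero, List.drop_take,
          Nat.add_mul, Nat.one_mul, Nat.add_sub_cancel_left]
    · rw [if_neg hj, List.getElem?_eq_none (by simpa using hj)]
      simp

-- ===== VERDICT (by name: the statement is the Claim_ definition above) =====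
theorem split_document_into_shards_spec : Claim_equal_split_document_into_shards := by
  intro dc n _ hpre
  unfold Spec_split_document_into_shards
  exact split_eq dc n hpre
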